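-- pv_equiv track=rewrite | github.com/pjessesco/print2d | print2d/__init__.py | _extract_substring_height
-- ===== SOURCE A (Python) =====
-- def _extract_substring_height(string, height):
--     h = 0
--     end = 0
--     if string.count("\n") < height:
--         return " " * (string.find("\n") + 1)
--
--     for i in range(len(string)):
--         if string[i] == '\n':
--             start = end
--             end = i + 1
--             if height == h:
--                 return string[start:end - 1] + " "
--             h += 1
--     return string[end:]
-- ===== SOURCE B (Python) =====
-- def _extract_substring_height(string, height):
--     lines = string.split("\n")
--     count = len(lines) - 1
--     if count < height:
--         return " " * (len(lines[0]) + 1 if count > 0 else 0)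
--     if 0 <= height < count:
--         return lines[height] + " "
--     return lines[-1]
-- ===== Notes on version B (the rewrite author's own statement) =====
-- stated objective: simpler
-- what changed: Replaces A's character-by-character index scan with explicit (h, start, end) loop state by a single split("\n") followed by direct indexing into the list of lines (lines[height] + " " in range, lines[-1] otherwise, with the same space-padding guard).
import Mathlib
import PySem

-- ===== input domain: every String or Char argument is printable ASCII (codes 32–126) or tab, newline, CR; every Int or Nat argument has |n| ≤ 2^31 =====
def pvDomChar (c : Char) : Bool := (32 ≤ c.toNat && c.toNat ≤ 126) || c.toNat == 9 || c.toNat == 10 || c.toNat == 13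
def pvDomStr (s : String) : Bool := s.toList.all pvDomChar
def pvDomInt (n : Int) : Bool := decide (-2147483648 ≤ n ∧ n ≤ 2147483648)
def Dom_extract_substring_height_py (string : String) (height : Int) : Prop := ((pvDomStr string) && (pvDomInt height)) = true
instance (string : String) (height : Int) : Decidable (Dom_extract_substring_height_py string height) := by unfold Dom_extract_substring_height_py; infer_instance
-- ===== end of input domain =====

-- B replaces A's character-by-character index scan with a split-on-"\n"-then-index strategy (simpler/idiomatic, same branch outcomes).

-- ===== PORT A =====
-- A's 'for i in range(len(string))' loop with early returns and state (h, end):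
-- structural recursion on the remaining suffix of the character list; slices are
-- exact (all slice indices here are nonnegative and in range).
def pvAGo (s : List Char) (height : Int) : List Char → Nat → Int → Nat → String
  | [], _, _, e => String.ofList (PySem.List.slice s (some (e : Int)) none)            -- return string[end:]
  | c :: rest, i, h, e =>
    if c == '\n' then
      -- start = end; end = i + 1; so string[start:end-1] is string[e:i]
      if height == h then String.ofList (PySem.List.slice s (some (e : Int)) (some (i : Int)) ++ [' '])
      else pvAGo s height rest (i + 1) (h + 1) (i + 1)
    else pvAGo s height rest (i + 1) h e

def extract_substring_height_py (string : String) (height : Int) : String :=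
  if (PySem.Str.count string "\n" : Int) < height then
    String.ofList (PySem.List.pyRepeat [' '] (PySem.Str.find string "\n" + 1))         -- " " * (string.find("\n") + 1)
  else
    pvAGo string.toList height string.toList 0 0 0

-- ===== PORT B =====
-- Source B: lines = string.split("\n") — ported as the corresponding Mathlib List.splitOn on the characters.
def extract_substring_height_py_alt (string : String) (height : Int) : String :=
  let lines := string.toList.splitOn '\n'
  let count : Int := (lines.length : Int) - 1
  if count < height then
    String.ofList (List.replicate (if 0 < count then lines.headI.length + 1 else 0) ' ')
  else if 0 ≤ height ∧ height < count then
    String.ofList (lines.getD height.toNat [] ++ [' '])                                 -- lines[height] + " "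
  else
    String.ofList (lines.getLastD [])                                                   -- lines[-1]

-- ===== PRECONDITION & SPEC =====
def Spec_extract_substring_height_py (string : String) (height : Int) (out : String) : Prop := out = extract_substring_height_py_alt string height
instance (string : String) (height : Int) (out : String) : Decidable (Spec_extract_substring_height_py string height out) := by unfold Spec_extract_substring_height_py; infer_instance

-- ===== CLAIM (what is proved, stated in full; the proofs are below) =====
def Claim_equal_extract_substring_height_py : Prop := ∀ (string : String) (height : Int), Dom_extract_substring_height_py string height → Spec_extract_substring_height_py string height (extract_substring_height_py string height)

-- ===== LEMMAS AND PROOFS =====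

-- the value A's loop computes, phrased on the split parts
def pvPick (height h : Int) (parts : List (List Char)) : String :=
  if 0 ≤ height - h ∧ height - h < (parts.length : Int) - 1 then
    String.ofList (parts.getD (height - h).toNat [] ++ [' '])
  else
    String.ofList (parts.getLastD [])

theorem pv_count_go_singleton (c : Char) : ∀ (l : List Char) (fuel acc : Nat), l.length ≤ fuel →
    PySem.Chars.count.go [c] fuel l acc = acc + l.count c := by
  intro l
  induction l with
  | nil => intro fuel acc _; cases fuel <;> simp [PySem.Chars.count.go]
  | cons a t ih =>
    intro fuel acc hle
    cases fuel with
    | zero => simp at hle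
    | succ f =>
      rw [PySem.Chars.count.go]
      have hlen : t.length ≤ f := by simpa using hle
      by_cases h : c = a
      · subst h
        simp [List.isPrefixOf, ih f (acc + 1) hlen]
        omega
      · have hpre : ([c].isPrefixOf (a :: t)) = false := by
          simp [List.isPrefixOf]; exact fun hc => absurd hc h
        have hne : (a = c) = False := by simp [Ne.symm h]
        simp [hpre, ih f acc hlen, List.count_cons, hne]

theorem pv_count_singleton (c : Char) (l : List Char) :
    PySem.Chars.count l [c] = l.count c := by
  unfold PySem.Chars.count
  simp [pv_count_go_singleton c l l.length 0 le_rfl]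

theorem pv_find_go_singleton (c : Char) : ∀ (l : List Char) (k : Nat),
    PySem.Chars.find.go [c] l k =
      if c ∈ l then ((k : Int) + ((l.takeWhile (fun x => !(x == c))).length : Int)) else -1 := by
  intro l
  induction l with
  | nil => intro k; simp [PySem.Chars.find.go.eq_1]
  | cons a t ih =>
    intro k
    rw [PySem.Chars.find.go.eq_2]
    by_cases h : c = a
    · subst h
      simp [List.isPrefixOf]
    · have hpre : ([c].isPrefixOf (a :: t)) = false := by
        simp [List.isPrefixOf]; exact fun hc => absurd hc h
      have hne : (a = c) = False := by simp [Ne.symm h]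
      simp [hpre, ih (k + 1), hne]
      by_cases hm : c ∈ t
      · simp [hm]; ring
      · simp [hm]; exact fun hc => absurd hc h

theorem pv_splitOnP_length (p : Char → Bool) (l : List Char) :
    (l.splitOnP p).length = l.countP p + 1 := by
  induction l with
  | nil => simp
  | cons a t ih =>
    rw [List.splitOnP_cons]
    by_cases h : p a <;> simp [h, ih]

theorem pv_splitOnP_headI (p : Char → Bool) (l : List Char) :
    (l.splitOnP p).headI = l.takeWhile (fun x => !(p x)) := by
  induction l with
  | nil => simp
  | cons a t ih =>
    rw [List.splitOnP_cons]
    by_cases h : p a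
    · simp [h]
    · rcases hsp : t.splitOnP p with _ | ⟨q, qs⟩
      · exact absurd hsp (List.splitOnP_ne_nil p t)
      · simp [h, ← ih, hsp]

theorem pvPick_cons (height hh : Int) (pre : List Char) (ps : List (List Char))
    (hne : height ≠ hh) (hps : ps ≠ []) :
    pvPick height hh (pre :: ps) = pvPick height (hh + 1) ps := by
  unfold pvPick
  rcases ps with _ | ⟨q, qs⟩
  · exact absurd rfl hps
  · by_cases hcond : 0 ≤ height - (hh + 1) ∧ height - (hh + 1) < ((q :: qs).length : Int) - 1
    · have hcond' : 0 ≤ height - hh ∧ height - hh < ((pre :: q :: qs).length : Int) - 1 := by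
        simp at hcond ⊢; omega
      have htn : (height - hh).toNat = (height - (hh + 1)).toNat + 1 := by omega
      simp only [if_pos hcond, if_pos hcond', htn, List.getD_cons_succ]
    · have hcond' : ¬(0 ≤ height - hh ∧ height - hh < ((pre :: q :: qs).length : Int) - 1) := by
        simp at hcond ⊢
        intro h0
        have h1 : height - hh ≠ 0 := by omega
        omega
      simp only [if_neg hcond, if_neg hcond', List.getLastD_cons]

theorem pvAGo_eq (height : Int) (s : List Char) : ∀ (rest : List Char) (i e : Nat) (hh : Int),
    rest = s.drop i → e ≤ i → (∀ c ∈ (s.drop e).take (i - e), (c == '\n') = false) →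
    pvAGo s height rest i hh e = pvPick height hh ((s.drop e).splitOnP (· == '\n')) := by
  intro rest
  induction rest with
  | nil =>
    intro i e hh hri hei hfree
    have hdropi : s.drop i = [] := hri.symm
    have hpre : s.drop e = (s.drop e).take (i - e) := by
      conv_lhs => rw [← List.take_append_drop (i - e) (s.drop e)]
      rw [List.drop_drop, show e + (i - e) = i from by omega, hdropi, List.append_nil]
    have hsingle : (s.drop e).splitOnP (· == '\n') = [s.drop e] := by
      apply List.splitOnP_eq_single
      intro x hx
      rw [hpre] at hx
      simp [hfree x hx]
    rw [pvAGo, hsingle, pvPick]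
    have hng : ¬(0 ≤ height - hh ∧ height - hh < (([s.drop e] : List (List Char)).length : Int) - 1) := by
      simp
    rw [if_neg hng]
    simp [PySem.List.slice_from s (by positivity : (0:Int) ≤ (e:Nat))]
  | cons c rest' ih =>
    intro i e hh hri hei hfree
    have hi : i < s.length := by
      by_contra hle
      have hnil : s.drop i = [] := List.drop_eq_nil_of_le (by omega)
      rw [hnil] at hri; simp at hri
    have hdrop1 : s.drop (i + 1) = rest' := by
      rw [← List.tail_drop, ← hri]
      simp
    set P := (s.drop e).take (i - e) with hP
    have hpresplit : s.drop e = P ++ c :: rest' := by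
      rw [hP]
      conv_lhs => rw [← List.take_append_drop (i - e) (s.drop e)]
      rw [List.drop_drop, show e + (i - e) = i from by omega, ← hri]
    have hprelen : P.length = i - e := by
      rw [hP, List.length_take, List.length_drop]; omega
    rw [pvAGo]
    by_cases hc : (c == '\n') = true
    · have hps := List.splitOnP_ne_nil (· == '\n') rest'
      have hsplitOn : (s.drop e).splitOnP (· == '\n') = P :: rest'.splitOnP (· == '\n') := by
        conv_lhs => rw [hpresplit, show c = '\n' from by simpa using hc]
        exact List.splitOnP_first _ _ (fun x hx => by simp [hfree x hx]) '\n' (by simp) rest'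
      rw [if_pos hc]
      by_cases hhh : (height == hh) = true
      · have heq : height = hh := by simpa using hhh
        rw [if_pos hhh, hsplitOn, pvPick]
        rcases hqs : rest'.splitOnP (· == '\n') with _ | ⟨q, qs⟩
        · exact absurd hqs hps
        · have hcond : 0 ≤ height - hh ∧
              height - hh < ((P :: q :: qs).length : Int) - 1 := by
            constructor
            · omega
            · simp; omega
          rw [if_pos hcond, show (height - hh).toNat = 0 from by omega]
          rw [show PySem.List.slice s (some (e : Int)) (some (i : Int))
                = List.take (i - e) (List.drop e s) from PySem.List.slice_natCast s e i, ← hP]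
          simp
      · have hne : height ≠ hh := by simpa using hhh
        rw [if_neg hhh, ih (i + 1) (i + 1) (hh + 1) hdrop1.symm le_rfl (by simp),
          hdrop1, hsplitOn, pvPick_cons height hh _ _ hne hps]
    · have hcfalse : (c == '\n') = false := by simpa using hc
      have htake : (s.drop e).take (i + 1 - e) = P ++ [c] := by
        conv_lhs => rw [hpresplit]
        rw [List.take_append, List.take_of_length_le (by omega), hprelen,
          show i + 1 - e - (i - e) = 1 from by omega, List.take_succ_cons, List.take_zero]
      rw [if_neg hc, ih (i + 1) e hh hdrop1.symm (by omega) ?_]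
      rw [htake]
      intro x hx
      rcases List.mem_append.mp hx with h | h
      · exact hfree x h
      · simp at h; rw [h]; exact hcfalse

-- ===== VERDICT (by name: the statement is the Claim_ definition above) =====
theorem extract_substring_height_py_spec : Claim_equal_extract_substring_height_py := by
  intro string height _
  unfold Spec_extract_substring_height_py extract_substring_height_py extract_substring_height_py_alt
  simp only [List.splitOn]
  set cs := string.toList with hcs
  have hcount : (PySem.Str.count string "\n") = cs.count '\n' := by
    rw [PySem.Str.count_eq]
    exact pv_count_singleton '\n' cs
  have hlen : (cs.splitOnP (· == '\n')).length = cs.count '\n' + 1 := by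
    rw [pv_splitOnP_length, List.count_eq_countP]
  by_cases hg : ((cs.splitOnP (· == '\n')).length : Int) - 1 < height
  · have hg' : (PySem.Str.count string "\n" : Int) < height := by
      rw [hcount]; omega
    rw [if_pos hg', if_pos hg, PySem.Str.find_eq]
    show String.ofList (PySem.List.pyRepeat [' '] (PySem.Chars.find cs ['\n'] + 1)) = _
    unfold PySem.Chars.find
    rw [pv_find_go_singleton '\n' cs 0, PySem.List.pyRepeat_singleton]
    by_cases hm : '\n' ∈ cs
    · have hpos : 0 < ((cs.splitOnP (· == '\n')).length : Int) - 1 := by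
        have := List.count_pos_iff.mpr hm
        omega
      rw [if_pos hm, if_pos hpos, pv_splitOnP_headI]
      congr 1
      congr 1
      omega
    · have hzero : ¬ 0 < ((cs.splitOnP (· == '\n')).length : Int) - 1 := by
        have : cs.count '\n' = 0 := by
          rw [List.count_eq_zero]; exact hm
        omega
      rw [if_neg hm, if_neg hzero]
      simp
  · have hg' : ¬ (PySem.Str.count string "\n" : Int) < height := by
      rw [hcount]; omega
    rw [if_neg hg', if_neg hg,
      pvAGo_eq height cs cs 0 0 0 (by simp) le_rfl (by simp), List.drop_zero, pvPick]
    simp only [sub_zero]
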